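-- pv_equiv track=rewrite | github.com/michalsieron/computer_architecture_project | benches/adder.py | normalized_bits_to_denormalized_bits
-- ===== SOURCE A (Python) =====
-- def normalized_bits_to_denormalized_bits(bits):
--     s, e, f = bits[0], bits[1:9], bits[9:]
--     if any(e):
--         e_bin = "".join(map(str, e))
--         new_e_int = int(e_bin, 2) + 1
--         new_e_bin = bin(new_e_int)[2:].zfill(8)
--         e = [int(b) for b in new_e_bin]
--
--         f = [1, *f][:-1]
--
--     return [s, *e, *f]
-- ===== SOURCE B (Python) =====
-- # B: ripple-carry increment over the exponent bits instead of A's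
-- # str-join / int(...,2) / bin / zfill round-trip; same split and fraction shift.
-- def _inc_lsb_first(rbits):
--     # add 1 to a bit list given least-significant-bit first
--     if not rbits:
--         return [1]
--     b, rest = rbits[0], rbits[1:]
--     if b == 1:
--         return [0] + _inc_lsb_first(rest)
--     return [1] + rest
--
-- def normalized_bits_to_denormalized_bits(bits):
--     s, e, f = bits[0], bits[1:9], bits[9:]
--     if any(e):
--         if any(b not in (0, 1) for b in e):
--             raise ValueError("exponent entries must be bits (0 or 1)")
--         ne = list(reversed(_inc_lsb_first(list(reversed(e)))))
--         e = [0] * (8 - len(ne)) + ne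
--         f = [1, *f][:-1]
--     return [s, *e, *f]
-- ===== Notes on version B (the rewrite author's own statement) =====
-- stated objective: alternative
-- what changed: A converts the exponent bits to a string, parses it with int(.,2), adds 1, re-renders with bin/zfill and re-parses the characters; B validates that the exponent entries are bits and increments them with a recursive ripple-carry over the bit list (LSB first, prepending a carry-out bit), left-padding to 8 bits, with no string round-trip.
-- outside the precondition, e.g. on normalized_bits_to_denormalized_bits([0, -1]): A returns [0, 0, 0, 0, 0, 0, 0, 0, 0], B raises ValueError; on normalized_bits_to_denormalized_bits([0, 10, 1]): A returns [0, 0, 0, 0, 0, 0, 1, 1, 0], B raises ValueError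
import Mathlib
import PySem

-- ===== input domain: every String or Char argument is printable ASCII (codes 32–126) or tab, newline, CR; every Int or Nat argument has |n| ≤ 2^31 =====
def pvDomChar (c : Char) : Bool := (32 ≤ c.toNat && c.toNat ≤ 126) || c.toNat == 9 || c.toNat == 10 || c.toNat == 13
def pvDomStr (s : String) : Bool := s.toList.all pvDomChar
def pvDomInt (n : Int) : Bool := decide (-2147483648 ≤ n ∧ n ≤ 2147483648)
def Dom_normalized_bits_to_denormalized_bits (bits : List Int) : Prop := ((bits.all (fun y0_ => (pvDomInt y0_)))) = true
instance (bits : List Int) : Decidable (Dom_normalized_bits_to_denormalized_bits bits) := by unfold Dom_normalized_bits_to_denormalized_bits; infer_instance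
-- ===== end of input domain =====

-- B replaces A's str-join/int(·,2)/bin/zfill exponent increment by a ripple-carry
-- add-one over the exponent bit list (objective: alternative decomposition, same cost).

-- ===== PORT A =====
def normalized_bits_to_denormalized_bits (bits : List Int) : List Int :=
  let s := (PySem.List.pyGet? bits 0).getD 0            -- bits[0]; none = IndexError, excluded by Pre_
  let e := PySem.List.slice bits (some 1) (some 9)      -- bits[1:9]
  let f := PySem.List.slice bits (some 9) none          -- bits[9:]
  if e.any (fun b => b != 0) then                       -- any(e)
    let e_bin := PySem.Chars.join [] (e.map PySem.Int.toChars)   -- "".join(map(str, e))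
    match PySem.Int.ofCharsBase? e_bin 2 with           -- int(e_bin, 2)
    | none => []                                        -- ValueError; excluded by Pre_
    | some v =>
      let new_e_int := v + 1
      let new_e_bin := PySem.Chars.zfill ((PySem.Int.toBinChars0b new_e_int).drop 2) 8  -- bin(·)[2:].zfill(8)
      let e2 := new_e_bin.map (fun c => (PySem.Int.ofChars? [c]).getD 0)  -- [int(b) for b in ·]; a non-digit char (ValueError) is unreachable under Pre_
      s :: (e2 ++ PySem.List.slice (1 :: f) none (some (-1)))             -- [s, *e, *[1,*f][:-1]]
  else s :: (e ++ f)

-- ===== PORT B =====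
-- add 1 to a bit list given least-significant-bit first (Source B's _inc_lsb_first)
def incLSB : List Int → List Int
  | [] => [1]
  | b :: rest => if b = 1 then 0 :: incLSB rest else 1 :: rest

def normalized_bits_to_denormalized_bits_alt (bits : List Int) : List Int :=
  let s := (PySem.List.pyGet? bits 0).getD 0            -- bits[0]; none = IndexError, excluded by Pre_
  let e := PySem.List.slice bits (some 1) (some 9)      -- bits[1:9]
  let f := PySem.List.slice bits (some 9) none          -- bits[9:]
  if e.any (fun b => b != 0) then                       -- any(e)
    if e.any (fun b => !(b == 0 || b == 1)) then []     -- raise ValueError; excluded by Pre_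
    else
    let ne := (incLSB e.reverse).reverse
    let e2 := List.replicate (8 - ne.length) 0 ++ ne    -- [0] * (8 - len(ne)) + ne
    s :: (e2 ++ PySem.List.slice (1 :: f) none (some (-1)))               -- [s, *e, *[1,*f][:-1]]
  else s :: (e ++ f)

-- ===== PRECONDITION & SPEC =====
-- Pre_ excludes the empty list (A raises IndexError) and lists whose exponent slice
-- bits[1:9] contains a nonzero entry other than 0/1: there A's str-join / int(·,2)
-- reparse usually raises ValueError, and where it happens to parse (multi-digit or
-- negative entries re-read as a binary string) the returned value is an accident of
-- the string round-trip, not a bit-list increment, and B raises ValueError there.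
def Pre_normalized_bits_to_denormalized_bits (bits : List Int) : Prop :=
  bits ≠ [] ∧ ∀ b ∈ (bits.drop 1).take 8, b = 0 ∨ b = 1
instance (bits : List Int) : Decidable (Pre_normalized_bits_to_denormalized_bits bits) := by unfold Pre_normalized_bits_to_denormalized_bits; infer_instance

def pvWitness_normalized_bits_to_denormalized_bits : List Int := [0, 1, 0, 0, 0, 0, 0, 0, 1, 1, 0, 1]

def Spec_normalized_bits_to_denormalized_bits (bits : List Int) (out : List Int) : Prop := out = normalized_bits_to_denormalized_bits_alt bits
instance (bits : List Int) (out : List Int) : Decidable (Spec_normalized_bits_to_denormalized_bits bits out) := by unfold Spec_normalized_bits_to_denormalized_bits; infer_instance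

-- ===== CLAIM (what is proved, stated in full; the proofs are below) =====
def Claim_equal_normalized_bits_to_denormalized_bits : Prop := ∀ (bits : List Int), Dom_normalized_bits_to_denormalized_bits bits → Pre_normalized_bits_to_denormalized_bits bits → Spec_normalized_bits_to_denormalized_bits bits (normalized_bits_to_denormalized_bits bits)

-- ===== LEMMAS AND PROOFS =====

-- all 0/1-lists of length n
def binLists : Nat → List (List Int)
  | 0 => [[]]
  | n + 1 => (binLists n).flatMap (fun l => [0 :: l, 1 :: l])

-- all 0/1-lists of length ≤ 8 (the possible values of bits[1:9] under Pre_)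
def allE : List (List Int) := (List.range 9).flatMap binLists

lemma mem_binLists (l : List Int) (h : ∀ b ∈ l, b = 0 ∨ b = 1) : l ∈ binLists l.length := by
  induction l with
  | nil => simp [binLists]
  | cons b t ih =>
    have ht : t ∈ binLists t.length := ih (fun x hx => h x (List.mem_cons_of_mem _ hx))
    have hb := h b (List.mem_cons_self ..)
    simp only [List.length_cons, binLists, List.mem_flatMap]
    exact ⟨t, ht, by rcases hb with hb | hb <;> simp [hb]⟩

lemma mem_allE (l : List Int) (hlen : l.length ≤ 8) (h : ∀ b ∈ l, b = 0 ∨ b = 1) :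
    l ∈ allE := by
  unfold allE
  exact List.mem_flatMap.mpr ⟨l.length, List.mem_range.mpr (by omega), mem_binLists l h⟩

-- the binary value of a bit list, most-significant bit first
def valOf (l : List Int) : Int := l.foldl (fun a b => 2 * a + b) 0

-- the core computation: on every 0/1-list of length ≤ 8 with a set bit,
-- A's string round-trip parses to valOf and its rendered increment equals B's ripple-carry increment
set_option maxRecDepth 100000 in
set_option maxHeartbeats 1000000 in
lemma core : ∀ l ∈ allE, l.any (fun b => b != 0) = true →
    PySem.Int.ofCharsBase? (PySem.Chars.join [] (l.map PySem.Int.toChars)) 2 = some (valOf l) ∧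
    (PySem.Chars.zfill ((PySem.Int.toBinChars0b (valOf l + 1)).drop 2) 8).map
        (fun c => (PySem.Int.ofChars? [c]).getD 0) =
      List.replicate (8 - (incLSB l.reverse).reverse.length) 0 ++ (incLSB l.reverse).reverse := by
  decide

-- ===== VERDICT (by name: the statement is the Claim_ definition above) =====
theorem normalized_bits_to_denormalized_bits_spec : Claim_equal_normalized_bits_to_denormalized_bits := by
  intro bits _ hPre
  obtain ⟨hne, h01⟩ := hPre
  unfold Spec_normalized_bits_to_denormalized_bits
  match bits with
  | [] => exact absurd rfl hne
  | s :: rest =>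
    have hslice : PySem.List.slice (s :: rest) (some 1) (some 9) = rest.take 8 := by
      simp [pysem]
    unfold normalized_bits_to_denormalized_bits normalized_bits_to_denormalized_bits_alt
    rw [hslice]
    by_cases hg : (rest.take 8).any (fun b => b != 0) = true
    · rw [if_pos hg, if_pos hg]
      have hm : rest.take 8 ∈ allE :=
        mem_allE _ (List.length_take_le ..) (by simpa using h01)
      have h01' : ∀ b ∈ rest.take 8, b = 0 ∨ b = 1 := by simpa using h01
      have hval : (rest.take 8).any (fun b => !(b == 0 || b == 1)) = false := by
        simp only [List.any_eq_false]
        intro b hb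
        rcases h01' b hb with h | h <;> simp [h]
      rw [hval]
      obtain ⟨hparse, hexp⟩ := core _ hm hg
      simp only [hparse, hexp, Bool.false_eq_true, if_false]
    · rw [if_neg hg, if_neg hg]
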